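-- pv_equiv track=rewrite | github.com/DeclanJeon/pdftomd | cli/pdf_to_md.py | _iter_selected_page_windows
-- ===== SOURCE A (Python) =====
-- from collections.abc import Iterable, Iterator
--
-- OCR_PAGE_WINDOW_SIZE = 2
--
-- def _iter_selected_page_windows(
--     page_indices: list[int], window_size: int
-- ) -> Iterator[tuple[int, int]]:
--     if not page_indices:
--         return
--     sorted_indices = sorted(set(index for index in page_indices if index >= 0))
--     bounded_window_size = max(1, min(window_size, OCR_PAGE_WINDOW_SIZE))
--
--     run_start = sorted_indices[0]
--     run_end = sorted_indices[0]
--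
--     def _yield_chunked_windows(start_index: int, end_index: int) -> Iterator[tuple[int, int]]:
--         current = start_index
--         while current <= end_index:
--             chunk_end = min(end_index, current + bounded_window_size - 1)
--             yield (current + 1, chunk_end + 1)
--             current = chunk_end + 1
--
--     for page_index in sorted_indices[1:]:
--         if page_index == run_end + 1:
--             run_end = page_index
--             continue
--         yield from _yield_chunked_windows(run_start, run_end)
--         run_start = page_index
--         run_end = page_index
--
--     yield from _yield_chunked_windows(run_start, run_end)
-- ===== SOURCE B (Python) =====
-- OCR_PAGE_WINDOW_SIZE = 2
--
-- def _iter_selected_page_windows(page_indices, window_size):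
--     if not page_indices:
--         return
--     sorted_indices = sorted({i for i in page_indices if i >= 0})
--     bounded_window_size = max(1, min(window_size, OCR_PAGE_WINDOW_SIZE))
--     window_start = sorted_indices[0]
--     prev = window_start
--     window_len = 1
--     for idx in sorted_indices[1:]:
--         if idx == prev + 1 and window_len < bounded_window_size:
--             prev = idx
--             window_len += 1
--         else:
--             yield (window_start + 1, prev + 1)
--             window_start = idx
--             prev = idx
--             window_len = 1
--     yield (window_start + 1, prev + 1)
-- ===== Notes on version B (the rewrite author's own statement) =====
-- stated objective: simpler
-- what changed: Replaces the run-detection loop plus nested chunking inner generator with one linear pass that tracks the current window's start, last index and length, emitting a window as soon as it is full or the run breaks.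
-- outside the precondition, e.g. on _iter_selected_page_windows([-3], 2): A raises IndexError, B raises IndexError
import Mathlib
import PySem

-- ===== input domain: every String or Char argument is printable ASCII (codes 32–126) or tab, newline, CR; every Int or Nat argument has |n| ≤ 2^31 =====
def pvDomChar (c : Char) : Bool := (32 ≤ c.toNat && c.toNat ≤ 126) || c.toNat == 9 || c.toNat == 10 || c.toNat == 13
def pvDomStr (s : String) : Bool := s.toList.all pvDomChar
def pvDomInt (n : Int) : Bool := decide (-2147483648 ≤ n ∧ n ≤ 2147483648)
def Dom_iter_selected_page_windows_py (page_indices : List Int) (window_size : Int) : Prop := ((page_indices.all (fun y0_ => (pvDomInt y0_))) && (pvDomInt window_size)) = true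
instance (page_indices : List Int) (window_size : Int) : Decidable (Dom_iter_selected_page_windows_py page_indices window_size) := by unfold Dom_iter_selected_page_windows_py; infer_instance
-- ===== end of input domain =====

-- B replaces A's run-detection loop + nested chunking generator with one linear pass that
-- tracks the current window's start/last/length and emits each window as soon as it closes (objective: simpler).

-- ===== PORT A =====

-- A's inner generator _yield_chunked_windows(start, end): while current <= end,
-- emit (current+1, min(end, current+b-1)+1) and advance; b ≥ 1 is needed for termination.
def pvChunk (b : Int) (hb : 1 ≤ b) (cur endi : Int) : List (Int × Int) :=
  if h : cur ≤ endi then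
    (cur + 1, min endi (cur + b - 1) + 1) :: pvChunk b hb (min endi (cur + b - 1) + 1) endi
  else []
termination_by (endi + 1 - cur).toNat
decreasing_by
  have h1 : cur ≤ min endi (cur + b - 1) := le_min h (by omega)
  omega

-- A's main loop body: state = (run_start, run_end, emitted)
def pvStepA (b : Int) (hb : 1 ≤ b) (st : Int × Int × List (Int × Int)) (page : Int) :
    Int × Int × List (Int × Int) :=
  if page = st.2.1 + 1 then (st.1, page, st.2.2)
  else (page, page, st.2.2 ++ pvChunk b hb st.1 st.2.1)

def iter_selected_page_windows_py (page_indices : List Int) (window_size : Int) : List (Int × Int) :=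
  if page_indices = [] then []
  else
    let sorted_indices :=
      PySem.List.sorted (PySem.Set.ofList (page_indices.filter (fun index => decide (0 ≤ index)))) (fun x => x)
    let bounded_window_size := max 1 (min window_size 2)
    match PySem.List.pyGet? sorted_indices 0 with
    | none => []  -- sorted_indices[0] raises IndexError: excluded by Pre_
    | some s0 =>
      let fin := (PySem.List.slice sorted_indices (some 1) none).foldl
        (pvStepA bounded_window_size (le_max_left 1 _)) (s0, s0, [])
      fin.2.2 ++ pvChunk bounded_window_size (le_max_left 1 _) fin.1 fin.2.1

-- ===== PORT B =====

-- B's loop body: state = (window_start, prev, window_len, emitted)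
def pvStepB (b : Int) (st : Int × Int × Int × List (Int × Int)) (idx : Int) :
    Int × Int × Int × List (Int × Int) :=
  if idx = st.2.1 + 1 ∧ st.2.2.1 < b then (st.1, idx, st.2.2.1 + 1, st.2.2.2)
  else (idx, idx, 1, st.2.2.2 ++ [(st.1 + 1, st.2.1 + 1)])

def iter_selected_page_windows_py_alt (page_indices : List Int) (window_size : Int) : List (Int × Int) :=
  if page_indices = [] then []
  else
    let sorted_indices :=
      PySem.List.sorted (PySem.Set.ofList (page_indices.filter (fun i => decide (0 ≤ i)))) (fun x => x)
    let bounded_window_size := max 1 (min window_size 2)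
    match PySem.List.pyGet? sorted_indices 0 with
    | none => []  -- sorted_indices[0] raises IndexError: excluded by Pre_
    | some s0 =>
      let fin := (PySem.List.slice sorted_indices (some 1) none).foldl
        (pvStepB bounded_window_size) (s0, s0, 1, [])
      fin.2.2.2 ++ [(fin.1 + 1, fin.2.1 + 1)]

-- ===== PRECONDITION & SPEC =====
-- Pre_ excludes only inputs where A raises IndexError (a nonempty list whose elements are all
-- negative: the filtered set is empty and sorted_indices[0] fails); B raises there too.
def Pre_iter_selected_page_windows_py (page_indices : List Int) (window_size : Int) : Prop :=
  page_indices = [] ∨ ∃ i ∈ page_indices, 0 ≤ i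
instance (page_indices : List Int) (window_size : Int) : Decidable (Pre_iter_selected_page_windows_py page_indices window_size) := by unfold Pre_iter_selected_page_windows_py; infer_instance

def pvWitness_iter_selected_page_windows_py : List Int × Int := ([4, 0, 1, 2, 9, 1], 3)

def Spec_iter_selected_page_windows_py (page_indices : List Int) (window_size : Int) (out : List (Int × Int)) : Prop := out = iter_selected_page_windows_py_alt page_indices window_size
instance (page_indices : List Int) (window_size : Int) (out : List (Int × Int)) : Decidable (Spec_iter_selected_page_windows_py page_indices window_size out) := by unfold Spec_iter_selected_page_windows_py; infer_instance

-- ===== CLAIM (what is proved, stated in full; the proofs are below) =====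
def Claim_equal_iter_selected_page_windows_py : Prop := ∀ (page_indices : List Int) (window_size : Int), Dom_iter_selected_page_windows_py page_indices window_size → Pre_iter_selected_page_windows_py page_indices window_size → Spec_iter_selected_page_windows_py page_indices window_size (iter_selected_page_windows_py page_indices window_size)

-- ===== LEMMAS AND PROOFS =====

-- the k full windows B has already emitted from a run starting at rs
def pvFW (b rs : Int) : Nat → List (Int × Int)
  | 0 => []
  | k + 1 => (rs + 1, rs + b) :: pvFW b (rs + b) k

theorem pvFW_snoc (b rs : Int) (k : Nat) :
    pvFW b rs (k + 1) = pvFW b rs k ++ [(rs + k * b + 1, rs + k * b + b)] := by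
  induction k generalizing rs with
  | zero => simp [pvFW]
  | succ n ih =>
    rw [pvFW, ih, pvFW, List.cons_append]
    push_cast
    ring_nf

theorem pvChunk_char (b : Int) (hb : 1 ≤ b) (k : Nat) :
    ∀ rs re : Int, rs + k * b ≤ re → re < rs + k * b + b →
    pvChunk b hb rs re = pvFW b rs k ++ [(rs + k * b + 1, re + 1)] := by
  induction k with
  | zero =>
    intro rs re h1 h2
    push_cast at h1 h2
    rw [pvChunk]
    have hmin : min re (rs + b - 1) = re := min_eq_left (by linarith)
    rw [dif_pos (by linarith), hmin, pvChunk, dif_neg (by omega)]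
    simp [pvFW]
  | succ n ih =>
    intro rs re h1 h2
    have hnb : (0:Int) ≤ (n:Int) * b := by positivity
    have hcast : ((n:Int) + 1) * b = (n:Int) * b + b := by ring
    push_cast at h1 h2
    rw [hcast] at h1 h2
    rw [pvChunk]
    have hmin : min re (rs + b - 1) = rs + b - 1 := min_eq_right (by linarith)
    rw [dif_pos (by linarith), hmin]
    have hstep : rs + b - 1 + 1 = rs + b := by ring
    rw [hstep, ih (rs + b) re (by linarith) (by linarith), pvFW, List.cons_append]
    push_cast
    ring_nf

-- the joint loop invariant: folding the same tail with A's state (rs, re, accA) and B's state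
-- (bs, re, len, accB) — bs = rs + k·b, len = re - bs + 1 ∈ [1, b], accB = accA ++ pvFW b rs k —
-- produces the same final output including the flush.
theorem pvFold_eq (b : Int) (hb : 1 ≤ b) :
    ∀ (t : List Int) (rs re : Int) (accA : List (Int × Int)) (bs len : Int)
      (accB : List (Int × Int)) (k : Nat),
    bs = rs + k * b → len = re - bs + 1 → 1 ≤ len → len ≤ b →
    accB = accA ++ pvFW b rs k →
    (let f := t.foldl (pvStepA b hb) (rs, re, accA); f.2.2 ++ pvChunk b hb f.1 f.2.1)
      = (let g := t.foldl (pvStepB b) (bs, re, len, accB); g.2.2.2 ++ [(g.1 + 1, g.2.1 + 1)]) := by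
  intro t
  induction t with
  | nil =>
    intro rs re accA bs len accB k hbs hlen h1 h2 hacc
    simp only [List.foldl_nil]
    rw [pvChunk_char b hb k rs re (by linarith [hbs.symm.le]) (by linarith), hacc, hbs]
    simp [List.append_assoc]
  | cons p t ih =>
    intro rs re accA bs len accB k hbs hlen h1 h2 hacc
    simp only [List.foldl_cons]
    by_cases hp : p = re + 1
    · by_cases hl : len < b
      · -- both extend the current window
        rw [show pvStepA b hb (rs, re, accA) p = (rs, p, accA) by
              simp [pvStepA, hp],
            show pvStepB b (bs, re, len, accB) p = (bs, p, len + 1, accB) by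
              simp [pvStepB, hp, hl]]
        exact ih rs p accA bs (len + 1) accB k hbs (by omega) (by omega) (by omega) hacc
      · -- A extends the run; B closes a full window and starts the next one
        have hlb : len = b := by omega
        rw [show pvStepA b hb (rs, re, accA) p = (rs, p, accA) by
              simp [pvStepA, hp],
            show pvStepB b (bs, re, len, accB) p = (p, p, 1, accB ++ [(bs + 1, re + 1)]) by
              simp [pvStepB, hl]]
        have hkb : ((k:Int) + 1) * b = (k:Int) * b + b := by ring
        refine ih rs p accA p 1 (accB ++ [(bs + 1, re + 1)]) (k + 1)
          (by push_cast; rw [hkb]; linarith) (by linarith) le_rfl hb ?_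
        rw [hacc, pvFW_snoc, ← List.append_assoc]
        have h3 : bs + 1 = rs + (k:Int) * b + 1 := by linarith
        have h4 : re + 1 = rs + (k:Int) * b + b := by linarith
        rw [h3, h4]
    · -- run break: A flushes the whole run via pvChunk, B flushes the last open window
      rw [show pvStepA b hb (rs, re, accA) p = (p, p, accA ++ pvChunk b hb rs re) by
            simp [pvStepA, hp],
          show pvStepB b (bs, re, len, accB) p = (p, p, 1, accB ++ [(bs + 1, re + 1)]) by
            simp [pvStepB, hp]]
      refine ih p p (accA ++ pvChunk b hb rs re) p 1 (accB ++ [(bs + 1, re + 1)]) 0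
        (by push_cast; ring) (by ring) le_rfl hb ?_
      rw [hacc, pvChunk_char b hb k rs re (by linarith) (by linarith), hbs]
      simp [pvFW, List.append_assoc]

-- ===== VERDICT (by name: the statement is the Claim_ definition above) =====
theorem iter_selected_page_windows_py_spec : Claim_equal_iter_selected_page_windows_py := by
  intro page_indices window_size _ hpre
  unfold Spec_iter_selected_page_windows_py
  unfold iter_selected_page_windows_py iter_selected_page_windows_py_alt
  by_cases hnil : page_indices = []
  · simp [hnil]
  · rw [if_neg hnil, if_neg hnil]
    dsimp only
    cases hg : PySem.List.pyGet?
        (PySem.List.sorted (PySem.Set.ofList (page_indices.filter (fun i => decide (0 ≤ i)))) (fun x => x)) 0 with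
    | none => rfl
    | some s0 =>
      exact pvFold_eq _ (le_max_left 1 _) _ s0 s0 [] s0 1 [] 0 (by push_cast; ring) (by ring)
        le_rfl (le_max_left 1 _) rfl
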